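-- pv_equiv track=rewrite | github.com/anushka369/30-Days-DSA-Bootcamp | DAY 3: ARRAYS OPERATIONS/Enchanted Lanterns: Calculating the Sum of Wish Values/solution.py | calculate_wish_values_sum
-- ===== SOURCE A (Python) =====
-- def calculate_wish_values_sum(N, A):
--
--     # Precompute maximum values from the current peak to the highest point
--     max_right = [0] * N
--     max_right[N - 1] = A[N - 1]
--
--     for i in range(N - 2, -1, -1):
--         max_right[i] = max(A[i], max_right[i + 1])
--
--     # Compute the sum of wish values using a running minimum
--     min_left = float('inf')
--     wish_values_sum = 0
--
--     for i in range(N):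
--         min_left = min(min_left, A[i])  # Update minimum from the start to current peak
--         wish_values_sum += abs(max_right[i] - min_left)
--
--     return wish_values_sum
-- ===== SOURCE B (Python) =====
-- def _run_sum(values, better):
--     # Run-length encode the running-record sequence of `values`: `runs` holds
--     # (record value, width of the stretch it dominates); a new run starts
--     # exactly when `better(a, current record)` holds.  The aggregate is the
--     # sum of value * width contributions, no per-index accumulation.
--     runs = []
--     for a in values:
--         if runs and not better(a, runs[-1][0]):
--             v, w = runs[-1]
--             runs[-1] = (v, w + 1)
--         else:
--             runs.append((a, 1))
--     return sum(v * w for v, w in runs)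
--
--
-- def calculate_wish_values_sum(N, A):
--     # sum of suffix maxima minus sum of prefix minima over indices 0..N-1,
--     # each computed by contribution counting over the record runs.
--     suffix_total = _run_sum((A[j] for j in range(N - 1, -1, -1)), lambda a, v: a > v)
--     prefix_total = _run_sum((A[j] for j in range(N)), lambda a, v: a < v)
--     return suffix_total - prefix_total
-- ===== Notes on version B (the rewrite author's own statement) =====
-- stated objective: alternative
-- what changed: B replaces A's per-index accumulation (explicit suffix-max array plus a running-min pass summing abs differences) by contribution counting: it run-length encodes the record runs of the running-min and running-max sequences of A[:N] and returns the difference of the two sums of value*width products, the abs being redundant since suffix_max[i] >= A[i] >= prefix_min[i].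
import Mathlib
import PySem

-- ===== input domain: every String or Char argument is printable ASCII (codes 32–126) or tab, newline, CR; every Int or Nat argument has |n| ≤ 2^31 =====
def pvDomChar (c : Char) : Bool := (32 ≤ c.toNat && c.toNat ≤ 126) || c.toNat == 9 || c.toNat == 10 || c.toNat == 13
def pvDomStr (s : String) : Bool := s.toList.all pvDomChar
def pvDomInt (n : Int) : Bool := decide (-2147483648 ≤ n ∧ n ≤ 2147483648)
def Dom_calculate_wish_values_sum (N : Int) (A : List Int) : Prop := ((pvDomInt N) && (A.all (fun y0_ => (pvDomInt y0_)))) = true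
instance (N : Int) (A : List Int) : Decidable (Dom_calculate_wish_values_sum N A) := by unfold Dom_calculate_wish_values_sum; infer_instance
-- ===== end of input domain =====

-- B replaces A's per-index abs-sum over an explicit suffix-max array by contribution
-- counting over record runs (run-length encoding of the running-min/max sequences).

-- `a if cur is None else f(cur, a)` — Python's running min/max with a None start
def pvComb (f : Int → Int → Int) (mo : Option Int) (a : Int) : Int :=
  match mo with
  | none => a
  | some m => f m a

-- ===== PORT A =====
-- the backward loop filling max_right[i] = max(A[i], max_right[i + 1])
def pvSufMax : List Int → List Int
  | [] => []
  | x :: xs =>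
    match pvSufMax xs with
    | [] => [x]
    | y :: ys => max x y :: y :: ys

-- one step of A's forward loop: min_left = min(min_left, A[i]); sum += abs(max_right[i] - min_left)
-- (min_left = float('inf') before the first step is modelled as `none`)
def pvStepA (st : Option Int × Int) (p : Int × Int) : Option Int × Int :=
  let ml := pvComb min st.1 p.2
  (some ml, st.2 + |p.1 - ml|)

def calculate_wish_values_sum (N : Int) (A : List Int) : Int :=
  let pref := A.take N.toNat                 -- indices 0..N-1 of A (valid under Pre_)
  let maxR := pvSufMax pref                  -- max_right
  ((maxR.zip pref).foldl pvStepA (none, 0)).2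

-- ===== PORT B =====
-- one loop step of _run_sum: extend the last run or start a new one
def pvRunStep (better : Int → Int → Bool) (runs : List (Int × Int)) (a : Int) : List (Int × Int) :=
  match runs.getLast? with
  | some (v, w) => if better a v then runs ++ [(a, 1)] else runs.dropLast ++ [(v, w + 1)]
  | none => runs ++ [(a, 1)]

-- _run_sum(xs, better) = sum(v * w for v, w in runs)
def pvRunSum (xs : List Int) (better : Int → Int → Bool) : Int :=
  ((xs.foldl (pvRunStep better) []).map (fun p => p.1 * p.2)).sum

-- the generators (A[j] for j in range(...)); the pyGetD default is never hit under Pre_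
def calculate_wish_values_sum_alt (N : Int) (A : List Int) : Int :=
  let suffix_total := pvRunSum ((PySem.List.pyRange (N - 1) (-1) (-1)).map (fun j => PySem.List.pyGetD A j 0)) (fun a v => a > v)
  let prefix_total := pvRunSum ((PySem.List.pyRange 0 N 1).map (fun j => PySem.List.pyGetD A j 0)) (fun a v => a < v)
  suffix_total - prefix_total

-- ===== PRECONDITION & SPEC =====
-- exactly the inputs where Python A returns: otherwise the max_right[N - 1] write
-- or the A[N - 1] read raises IndexError
def Pre_calculate_wish_values_sum (N : Int) (A : List Int) : Prop :=
  1 ≤ N ∧ N ≤ (A.length : Int)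
instance (N : Int) (A : List Int) : Decidable (Pre_calculate_wish_values_sum N A) := by
  unfold Pre_calculate_wish_values_sum; infer_instance

def pvWitness_calculate_wish_values_sum : Int × List Int := (2, [3, -1, 4])

def Spec_calculate_wish_values_sum (N : Int) (A : List Int) (out : Int) : Prop := out = calculate_wish_values_sum_alt N A
instance (N : Int) (A : List Int) (out : Int) : Decidable (Spec_calculate_wish_values_sum N A out) := by unfold Spec_calculate_wish_values_sum; infer_instance

-- ===== CLAIM (what is proved, stated in full; the proofs are below) =====
def Claim_equal_calculate_wish_values_sum : Prop := ∀ (N : Int) (A : List Int), Dom_calculate_wish_values_sum N A → Pre_calculate_wish_values_sum N A → Spec_calculate_wish_values_sum N A (calculate_wish_values_sum N A)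

-- ===== LEMMAS AND PROOFS =====

-- the list of intermediate `cur` values of a running-f loop (A's min_left)
def scanAcc (f : Int → Int → Int) : Option Int → List Int → List Int
  | _, [] => []
  | mo, a :: as => pvComb f mo a :: scanAcc f (some (pvComb f mo a)) as

-- the final running value after a whole list
def runAcc (f : Int → Int → Int) : Option Int → List Int → Option Int
  | mo, [] => mo
  | mo, a :: as => runAcc f (some (pvComb f mo a)) as

def pvWeight (rs : List (Int × Int)) : Int := (rs.map (fun p => p.1 * p.2)).sum

lemma foldl_pvStepA (as : List Int) :
    ∀ (mrs : List Int) (mo : Option Int) (s : Int),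
      ((mrs.zip as).foldl pvStepA (mo, s)).2
        = s + ((mrs.zip (scanAcc min mo as)).map (fun p => |p.1 - p.2|)).sum := by
  induction as with
  | nil => intro mrs mo s; simp [scanAcc]
  | cons a as ih =>
      intro mrs mo s
      cases mrs with
      | nil => simp [scanAcc]
      | cons m ms =>
          simp only [List.zip_cons_cons, List.foldl_cons, pvStepA, scanAcc,
            List.map_cons, List.sum_cons]
          rw [ih]; ring

lemma forall2_scanMin (as : List Int) :
    ∀ mo, List.Forall₂ (· ≤ ·) (scanAcc min mo as) as := by
  induction as with
  | nil => intro mo; simp [scanAcc]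
  | cons a as ih =>
      intro mo
      refine List.Forall₂.cons ?_ (ih _)
      cases mo with
      | none => simp [pvComb]
      | some m => simp [pvComb]

lemma forall2_sufMax (as : List Int) :
    List.Forall₂ (fun m a => a ≤ m) (pvSufMax as) as := by
  induction as with
  | nil => simp [pvSufMax]
  | cons x xs ih =>
      cases h : pvSufMax xs with
      | nil =>
          rw [h] at ih
          have hxs : xs = [] := List.forall₂_nil_left_iff.mp ih
          subst hxs
          simp [pvSufMax]
      | cons y ys =>
          rw [h] at ih
          simp only [pvSufMax, h]
          exact List.Forall₂.cons (le_max_left x y) ih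

lemma forall2_comp :
    ∀ {mrs pms as : List Int}, List.Forall₂ (fun m a => a ≤ m) mrs as →
      List.Forall₂ (· ≤ ·) pms as → List.Forall₂ (fun m p => p ≤ m) mrs pms := by
  intro mrs pms as h1
  induction h1 generalizing pms with
  | nil =>
      intro h2
      cases h2
      exact List.Forall₂.nil
  | cons hma _ ih =>
      intro h2
      cases h2 with
      | cons hpa htail => exact List.Forall₂.cons (le_trans hpa hma) (ih htail)

lemma sum_zip_abs :
    ∀ {mrs pms : List Int}, List.Forall₂ (fun m p => p ≤ m) mrs pms →
      ((mrs.zip pms).map (fun p => |p.1 - p.2|)).sum = mrs.sum - pms.sum := by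
  intro mrs pms h
  induction h with
  | nil => simp
  | cons hpm _ ih =>
      simp only [List.zip_cons_cons, List.map_cons, List.sum_cons, ih]
      rw [abs_of_nonneg (by omega)]
      ring

lemma runAcc_append (f : Int → Int → Int) (l : List Int) :
    ∀ (mo : Option Int) (x : Int),
      runAcc f mo (l ++ [x]) = some (pvComb f (runAcc f mo l) x) := by
  induction l with
  | nil => intro mo x; simp [runAcc]
  | cons a as ih => intro mo x; simp only [List.cons_append, runAcc, ih]

lemma scanAcc_append (f : Int → Int → Int) (l1 : List Int) :
    ∀ (l2 : List Int) (mo : Option Int),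
      scanAcc f mo (l1 ++ l2) = scanAcc f mo l1 ++ scanAcc f (runAcc f mo l1) l2 := by
  induction l1 with
  | nil => intro l2 mo; simp [scanAcc, runAcc]
  | cons a as ih =>
      intro l2 mo
      simp only [List.cons_append, scanAcc, runAcc, ih]

-- A's backward max_right array is the reversed running-max scan of the reversed prefix,
-- and the final running max is its head.
lemma sufMax_run (l : List Int) :
    pvSufMax l = (scanAcc max none l.reverse).reverse ∧
      runAcc max none l.reverse = (pvSufMax l).head? := by
  induction l with
  | nil => simp [pvSufMax, scanAcc, runAcc]
  | cons x xs ih =>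
      obtain ⟨ihEq, ihRun⟩ := ih
      have hscan : scanAcc max none (x :: xs).reverse
          = scanAcc max none xs.reverse ++ [pvComb max (runAcc max none xs.reverse) x] := by
        rw [List.reverse_cons, scanAcc_append]
        simp [scanAcc]
      have hrun : runAcc max none (x :: xs).reverse
          = some (pvComb max (runAcc max none xs.reverse) x) := by
        rw [List.reverse_cons, runAcc_append]
      cases h : pvSufMax xs with
      | nil =>
          have hsc : scanAcc max none xs.reverse = [] := by
            have := ihEq
            rw [h] at this
            simpa using this.symm
          rw [h] at ihRun
          constructor
          · rw [hscan, hsc, ihRun]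
            simp [pvSufMax, h, pvComb]
          · rw [hrun, ihRun]
            simp [pvSufMax, h, pvComb]
      | cons y ys =>
          rw [h] at ihRun
          have hcomb : pvComb max (runAcc max none xs.reverse) x = max x y := by
            rw [ihRun]; simp [pvComb, max_comm]
          constructor
          · rw [hscan, hcomb]
            simp only [List.reverse_append, List.reverse_cons, List.reverse_nil,
              List.nil_append, List.cons_append, ← ihEq, h]
            simp [pvSufMax, h]
          · rw [hrun, hcomb]
            simp [pvSufMax, h]

-- the run-length fold's weighted total is the sum of the running-record scan
lemma fold_run (f : Int → Int → Int) (better : Int → Int → Bool)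
    (hf : ∀ v a, f v a = if better a v then a else v) (l : List Int) :
    ∀ (rs : List (Int × Int)) (v w : Int),
      pvWeight (l.foldl (pvRunStep better) (rs ++ [(v, w)]))
        = pvWeight rs + v * w + (scanAcc f (some v) l).sum := by
  induction l with
  | nil =>
      intro rs v w
      simp [scanAcc, pvWeight]
  | cons a l ih =>
      intro rs v w
      have hlast : (rs ++ [(v, w)]).getLast? = some (v, w) := by simp
      have hdrop : (rs ++ [(v, w)]).dropLast = rs := by simp
      simp only [List.foldl_cons, pvRunStep, hlast, scanAcc, pvComb, List.sum_cons, hf]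
      by_cases hb : better a v
      · rw [if_pos hb, if_pos hb, ih (rs ++ [(v, w)]) a 1]
        simp [pvWeight]
        ring
      · rw [if_neg hb, if_neg hb, hdrop, ih rs v (w + 1)]
        ring

lemma runSum_eq_scan (f : Int → Int → Int) (better : Int → Int → Bool)
    (hf : ∀ v a, f v a = if better a v then a else v) (xs : List Int) :
    pvRunSum xs better = (scanAcc f none xs).sum := by
  cases xs with
  | nil => simp [pvRunSum, scanAcc]
  | cons x l =>
      simp only [pvRunSum, List.foldl_cons, pvRunStep, List.getLast?_nil, List.nil_append,
        scanAcc, pvComb, List.sum_cons]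
      have := fold_run f better hf l [] x 1
      simp only [List.nil_append, pvWeight] at this ⊢
      rw [this]
      simp

lemma map_range_take (A : List Int) (N : Int) (h2 : N ≤ (A.length : Int)) :
    (PySem.List.pyRange 0 N 1).map (fun j => PySem.List.pyGetD A j 0) = A.take N.toNat := by
  apply List.ext_getElem
  · simp [PySem.List.length_pyRange_one]
    omega
  · intro k hk1 hk2
    simp only [List.getElem_map, PySem.List.getElem_pyRange_one, List.getElem_take]
    have hk : k < A.length := by
      simp [List.length_take] at hk2; omega
    rw [show ((0 : Int) + k) = ((k : Nat) : Int) by ring]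
    rw [PySem.List.pyGetD_natCast]
    exact List.getD_eq_getElem A 0 hk

-- ===== VERDICT (by name: the statement is the Claim_ definition above) =====
theorem calculate_wish_values_sum_spec : Claim_equal_calculate_wish_values_sum := by
  intro N A _ hP
  obtain ⟨h1, h2⟩ := hP
  show calculate_wish_values_sum N A = calculate_wish_values_sum_alt N A
  simp only [calculate_wish_values_sum, calculate_wish_values_sum_alt]
  rw [PySem.List.pyRange_neg_one_eq_reverse]
  rw [show (-1 : Int) + 1 = 0 by ring, show N - 1 + 1 = N by ring]
  rw [List.map_reverse, map_range_take A N h2]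
  rw [foldl_pvStepA]
  rw [runSum_eq_scan max (fun a v => a > v)
    (by intro v a
        by_cases h : v < a
        · simp [h, max_eq_right h.le]
        · simp [h, max_eq_left (not_lt.mp h)])]
  rw [runSum_eq_scan min (fun a v => a < v)
    (by intro v a
        by_cases h : a < v
        · simp [h, min_eq_right h.le]
        · simp [h, min_eq_left (not_lt.mp h)])]
  rw [sum_zip_abs (forall2_comp (forall2_sufMax (A.take N.toNat)) (forall2_scanMin (A.take N.toNat) none))]
  rw [(sufMax_run (A.take N.toNat)).1, List.sum_reverse]
  ring
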